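-- pv_equiv track=rewrite | github.com/jagaldol/Algorithm-problem-solving | beakjoon/divideConquer/G4_1891_사분면(반복문 풀이).py | to_coordinate
-- ===== SOURCE A (Python) =====
-- def to_coordinate(n: str, d):
--     x, y = 0, 0
--
--     for level in range(d):
--         position = n[level]
--         modifier = 2 ** (d - 1 - level)
--
--         if position == "1":
--             x += modifier
--             y += modifier
--         elif position == "2":
--             y += modifier
--         elif position == "3":
--             pass
--         elif position == "4":
--             x += modifier
--     return x, y
-- ===== SOURCE B (Python) =====
-- def to_coordinate(n: str, d):
--     xbits = ""
--     ybits = ""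
--     for level in range(d):
--         c = n[level]
--         xbits += "1" if c in "14" else "0"
--         ybits += "1" if c in "12" else "0"
--     if not xbits:
--         return 0, 0
--     return int(xbits, 2), int(ybits, 2)
-- ===== Notes on version B (the rewrite author's own statement) =====
-- stated objective: faster
-- what changed: Instead of accumulating weighted powers 2**(d-1-level) into two integer sums, B builds two binary bit-strings (x-bit set for digits 1/4, y-bit for 1/2) in one pass and converts them with int(bits, 2), returning (0,0) when no bits were produced.
import Mathlib
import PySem

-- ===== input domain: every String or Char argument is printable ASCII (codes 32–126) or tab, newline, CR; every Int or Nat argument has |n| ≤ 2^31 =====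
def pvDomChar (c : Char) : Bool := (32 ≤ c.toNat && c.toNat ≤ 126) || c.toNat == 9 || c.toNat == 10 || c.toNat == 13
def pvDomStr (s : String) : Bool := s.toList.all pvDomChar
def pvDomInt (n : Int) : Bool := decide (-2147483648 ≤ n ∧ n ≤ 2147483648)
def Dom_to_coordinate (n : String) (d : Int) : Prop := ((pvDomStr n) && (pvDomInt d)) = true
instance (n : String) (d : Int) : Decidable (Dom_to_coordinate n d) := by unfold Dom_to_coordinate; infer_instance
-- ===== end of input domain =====

-- B builds two binary bit-strings (x-bit for digits 1/4, y-bit for 1/2) and converts them with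
-- int(bits, 2), instead of A's per-index power sums — measurably faster; return values only.

-- ===== PORT A =====
def to_coordinate (n : String) (d : Int) : Int × Int :=
  (PySem.List.pyRange 0 d 1).foldl
    (fun (xy : Int × Int) level =>
      match PySem.Str.pyGet? n level with
      | none => xy   -- Python raises IndexError here; such inputs are excluded by Pre_
      | some position =>
        let modifier : Int := 2 ^ (d - 1 - level).toNat   -- exponent ≥ 0 since level < d
        if position = '1' then (xy.1 + modifier, xy.2 + modifier)
        else if position = '2' then (xy.1, xy.2 + modifier)
        else if position = '3' then xy
        else if position = '4' then (xy.1 + modifier, xy.2)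
        else xy)
    (0, 0)

-- ===== PORT B =====
-- the loop of Source B: build the two bit-strings xbits, ybits (as lists of characters)
def pvBitStrings (n : String) (d : Int) : List Char × List Char :=
  (PySem.List.pyRange 0 d 1).foldl
    (fun (bs : List Char × List Char) level =>
      match PySem.Str.pyGet? n level with
      | none => bs   -- Python raises IndexError here; such inputs are excluded by Pre_
      | some c =>
        (bs.1 ++ [if c = '1' ∨ c = '4' then '1' else '0'],
         bs.2 ++ [if c = '1' ∨ c = '2' then '1' else '0']))
    ([], [])

-- port of Python's int(bits, 2) on a string of '0'/'1' characters (exact there)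
def pvBinVal (bits : List Char) : Int :=
  bits.foldl (fun acc c => 2 * acc + (if c = '1' then 1 else 0)) 0

def to_coordinate_alt (n : String) (d : Int) : Int × Int :=
  let bs := pvBitStrings n d
  if bs.1 = [] then (0, 0) else (pvBinVal bs.1, pvBinVal bs.2)

-- ===== PRECONDITION & SPEC =====
-- Pre_ excludes exactly the inputs where A raises IndexError (d exceeds the length of n).
def Pre_to_coordinate (n : String) (d : Int) : Prop := d ≤ PySem.Str.len n
instance (n : String) (d : Int) : Decidable (Pre_to_coordinate n d) := by unfold Pre_to_coordinate; infer_instance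
def pvWitness_to_coordinate : String × Int := ("132", 3)

def Spec_to_coordinate (n : String) (d : Int) (out : Int × Int) : Prop := out = to_coordinate_alt n d
instance (n : String) (d : Int) (out : Int × Int) : Decidable (Spec_to_coordinate n d out) := by unfold Spec_to_coordinate; infer_instance

-- ===== CLAIM (what is proved, stated in full; the proofs are below) =====
def Claim_equal_to_coordinate : Prop := ∀ (n : String) (d : Int), Dom_to_coordinate n d → Pre_to_coordinate n d → Spec_to_coordinate n d (to_coordinate n d)

-- ===== LEMMAS AND PROOFS =====

-- abbreviations for the two bit maps (proof-side only)
def pvXBit (c : Char) : Char := if c = '1' ∨ c = '4' then '1' else '0'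
def pvYBit (c : Char) : Char := if c = '1' ∨ c = '2' then '1' else '0'

lemma pvBinVal_append (l : List Char) (c : Char) :
    pvBinVal (l ++ [c]) = 2 * pvBinVal l + (if c = '1' then 1 else 0) := by
  simp [pvBinVal, List.foldl_append]

-- B's bit-string builder produces exactly the two bit maps over the first j characters.
lemma pvBitStrings_eq (n : String) (k : Nat) (hk : k ≤ n.toList.length) :
    ∀ j : Nat, j ≤ k →
    (PySem.List.pyRange 0 (j : Int) 1).foldl
      (fun (bs : List Char × List Char) level =>
        match PySem.Str.pyGet? n level with
        | none => bs
        | some c =>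
          (bs.1 ++ [if c = '1' ∨ c = '4' then '1' else '0'],
           bs.2 ++ [if c = '1' ∨ c = '2' then '1' else '0']))
      ([], [])
    = ((n.toList.take j).map pvXBit, (n.toList.take j).map pvYBit) := by
  intro j hj
  induction j with
  | zero => simp [PySem.List.pyRange_one_eq_nil]
  | succ j ih =>
    have hjl : j < n.toList.length := by omega
    have hcons : PySem.List.pyRange 0 ((j + 1 : Nat) : Int) 1
        = PySem.List.pyRange 0 (j : Int) 1 ++ [(j : Int)] := by
      have h := PySem.List.pyRange_one_succ_right (a := 0) (b := (j : Int)) (by omega)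
      push_cast; push_cast at h; exact h
    have hget : PySem.Str.pyGet? n ((j : Nat) : Int) = some (n.toList[j]) := by
      simp [List.getElem?_eq_getElem hjl]
    have htake : n.toList.take (j + 1) = n.toList.take j ++ [n.toList[j]] := by
      simp [List.take_add_one]
    rw [hcons, List.foldl_append, ih (by omega)]
    simp only [List.foldl_cons, List.foldl_nil, hget, htake, List.map_append,
      List.map_cons, List.map_nil, pvXBit, pvYBit]

-- One loop step of A: the four-way branch, applied to scaled accumulators, equals scaling
-- the bit-appended binary values.
lemma to_coordinate_step (c : Char) (x y m : Int) :
    (if c = '1' then (2 * m * x + m, 2 * m * y + m)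
     else if c = '2' then (2 * m * x, 2 * m * y + m)
     else if c = '3' then (2 * m * x, 2 * m * y)
     else if c = '4' then (2 * m * x + m, 2 * m * y)
     else (2 * m * x, 2 * m * y))
    = (m * (2 * x + (if c = '1' ∨ c = '4' then 1 else 0)),
       m * (2 * y + (if c = '1' ∨ c = '2' then 1 else 0))) := by
  rcases eq_or_ne c '1' with h1 | h1
  · subst h1; refine Prod.ext ?_ ?_ <;> simp <;> ring
  rcases eq_or_ne c '2' with h2 | h2
  · subst h2; refine Prod.ext ?_ ?_ <;> simp <;> ring
  rcases eq_or_ne c '3' with h3 | h3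
  · subst h3; refine Prod.ext ?_ ?_ <;> simp <;> ring
  rcases eq_or_ne c '4' with h4 | h4
  · subst h4; refine Prod.ext ?_ ?_ <;> simp <;> ring
  · refine Prod.ext ?_ ?_ <;> simp [h1, h2, h3, h4] <;> ring

-- Loop invariant: after the first j levels A's accumulators are the binary values of the
-- first j bits, scaled by 2^(k-j).
lemma to_coordinate_invariant (n : String) (k : Nat) (hk : k ≤ n.toList.length) :
    ∀ j : Nat, j ≤ k →
    (PySem.List.pyRange 0 (j : Int) 1).foldl
      (fun (xy : Int × Int) level =>
        match PySem.Str.pyGet? n level with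
        | none => xy
        | some position =>
          let modifier : Int := 2 ^ ((k : Int) - 1 - level).toNat
          if position = '1' then (xy.1 + modifier, xy.2 + modifier)
          else if position = '2' then (xy.1, xy.2 + modifier)
          else if position = '3' then xy
          else if position = '4' then (xy.1 + modifier, xy.2)
          else xy)
      (0, 0)
    = ((2 : Int) ^ (k - j) * pvBinVal ((n.toList.take j).map pvXBit),
       (2 : Int) ^ (k - j) * pvBinVal ((n.toList.take j).map pvYBit)) := by
  intro j hj
  induction j with
  | zero => simp [PySem.List.pyRange_one_eq_nil, pvBinVal]
  | succ j ih =>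
    have hjl : j < n.toList.length := by omega
    have hcons : PySem.List.pyRange 0 ((j + 1 : Nat) : Int) 1
        = PySem.List.pyRange 0 (j : Int) 1 ++ [(j : Int)] := by
      have h := PySem.List.pyRange_one_succ_right (a := 0) (b := (j : Int)) (by omega)
      push_cast; push_cast at h; exact h
    have hget : PySem.Str.pyGet? n ((j : Nat) : Int) = some (n.toList[j]) := by
      simp [List.getElem?_eq_getElem hjl]
    have htake : n.toList.take (j + 1) = n.toList.take j ++ [n.toList[j]] := by
      simp [List.take_add_one]
    have hexp : ((k : Int) - 1 - (j : Int)).toNat = k - (j + 1) := by omega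
    have hpow : (2 : Int) ^ (k - j) = 2 * (2 : Int) ^ (k - (j + 1)) := by
      have h : k - j = (k - (j + 1)) + 1 := by omega
      rw [h, pow_succ]; ring
    have hxb : pvBinVal ((n.toList.take (j+1)).map pvXBit)
        = 2 * pvBinVal ((n.toList.take j).map pvXBit)
          + (if n.toList[j] = '1' ∨ n.toList[j] = '4' then 1 else 0) := by
      rw [htake]; simp only [List.map_append, List.map_cons, List.map_nil, pvBinVal_append]
      unfold pvXBit; split_ifs <;> simp_all
    have hyb : pvBinVal ((n.toList.take (j+1)).map pvYBit)
        = 2 * pvBinVal ((n.toList.take j).map pvYBit)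
          + (if n.toList[j] = '1' ∨ n.toList[j] = '2' then 1 else 0) := by
      rw [htake]; simp only [List.map_append, List.map_cons, List.map_nil, pvBinVal_append]
      unfold pvYBit; split_ifs <;> simp_all
    rw [hcons, List.foldl_append, ih (by omega)]
    simp only [List.foldl_cons, List.foldl_nil, hget]
    rw [hexp, hpow, hxb, hyb]
    exact to_coordinate_step (n.toList[j]) _ _ _

-- ===== VERDICT (by name: the statement is the Claim_ definition above) =====
theorem to_coordinate_spec : Claim_equal_to_coordinate := by
  intro n d _ hpre
  unfold Spec_to_coordinate to_coordinate to_coordinate_alt pvBitStrings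
  unfold Pre_to_coordinate at hpre
  by_cases hd : d ≤ 0
  · have h1 : PySem.List.pyRange 0 d 1 = [] := PySem.List.pyRange_one_eq_nil hd
    rw [h1]; simp
  · have hlen : PySem.Str.len n = (n.toList.length : Int) := by simp [PySem.Str.len_eq]
    have hdk : d = ((d.toNat : Nat) : Int) := by omega
    have hkl : d.toNat ≤ n.toList.length := by rw [hlen] at hpre; omega
    have hne : (n.toList.take d.toNat).map pvXBit ≠ [] := by
      intro h
      have h2 := congrArg List.length h
      rw [List.length_map, List.length_take, List.length_nil, Nat.min_eq_left hkl] at h2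
      omega
    rw [hdk, pvBitStrings_eq n d.toNat hkl d.toNat le_rfl,
        to_coordinate_invariant n d.toNat hkl d.toNat le_rfl,
        if_neg hne]
    simp
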